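-- pv_equiv track=rewrite | github.com/SUUUUUMIN/To_Coding | 프로그래머스/unrated/120837. 개미 군단/개미 군단.py | solution
-- ===== SOURCE A (Python) =====
-- def solution(hp):
--     answer = 0
--     arr=[5,3,1]
--     for i in arr:
--         answer+=hp//i
--         hp=hp%i
--         if hp==0:
--             break
--     return answer
-- ===== SOURCE B (Python) =====
-- def solution(hp):
--     return hp // 5 + hp % 5 // 3 + hp % 5 % 3
-- ===== Notes on version B (the rewrite author's own statement) =====
-- stated objective: simpler
-- what changed: Replaced the greedy loop over [5,3,1] with the closed-form expression hp//5 + hp%5//3 + hp%5%3.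
import Mathlib
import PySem

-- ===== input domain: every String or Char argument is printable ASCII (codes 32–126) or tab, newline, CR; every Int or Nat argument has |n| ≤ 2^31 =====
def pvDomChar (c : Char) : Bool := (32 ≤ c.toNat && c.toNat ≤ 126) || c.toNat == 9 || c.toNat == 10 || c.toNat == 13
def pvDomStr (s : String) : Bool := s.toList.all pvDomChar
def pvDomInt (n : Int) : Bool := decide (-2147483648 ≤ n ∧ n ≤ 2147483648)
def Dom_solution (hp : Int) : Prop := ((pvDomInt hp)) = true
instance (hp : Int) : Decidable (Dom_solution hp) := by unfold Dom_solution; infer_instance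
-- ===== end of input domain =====

-- B replaces A's greedy loop over [5,3,1] with the equivalent closed-form
-- expression hp//5 + hp%5//3 + hp%5%3 (simpler; same O(1) cost).


-- ===== PORT A =====
-- the for-loop with its break, as structural recursion over the list [5,3,1]
def solutionLoop : List Int → Int → Int → Int
  | [], answer, _ => answer
  | i :: rest, answer, hp =>
      let answer' := answer + PySem.Int.floordiv hp i
      let hp' := PySem.Int.mod hp i
      if hp' = 0 then answer' else solutionLoop rest answer' hp'

def solution (hp : Int) : Int := solutionLoop [5, 3, 1] 0 hp

-- ===== PORT B =====
def solution_alt (hp : Int) : Int :=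
  PySem.Int.floordiv hp 5 + PySem.Int.floordiv (PySem.Int.mod hp 5) 3
    + PySem.Int.mod (PySem.Int.mod hp 5) 3

-- ===== PRECONDITION & SPEC =====
def Spec_solution (hp : Int) (out : Int) : Prop := out = solution_alt hp
instance (hp : Int) (out : Int) : Decidable (Spec_solution hp out) := by unfold Spec_solution; infer_instance

-- ===== CLAIM (what is proved, stated in full; the proofs are below) =====
def Claim_equal_solution : Prop := ∀ (hp : Int), Dom_solution hp → Spec_solution hp (solution hp)

-- ===== LEMMAS AND PROOFS =====

-- ===== VERDICT (by name: the statement is the Claim_ definition above) =====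
theorem solution_spec : Claim_equal_solution := by
  intro hp _
  show solution hp = solution_alt hp
  have hm : ∀ (a b : Int), 0 < b → PySem.Int.mod a b = a % b := by
    intro a b hb; exact PySem.Int.mod_eq_emod_of_pos hb
  have hd : ∀ (a b : Int), 0 < b → PySem.Int.floordiv a b = a / b := by
    intro a b hb; exact PySem.Int.floordiv_eq_ediv_of_pos hb
  simp only [solution, solution_alt, solutionLoop,
    hm _ 5 (by norm_num), hm _ 3 (by norm_num), hm _ 1 (by norm_num),
    hd _ 5 (by norm_num), hd _ 3 (by norm_num), hd _ 1 (by norm_num)]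
  split_ifs with h1 h2 <;> omega
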